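-- pv_equiv track=rewrite | github.com/himamis/mathrec | trainer/task.py | formula_string_to_tokens
-- ===== SOURCE A (Python) =====
-- def formula_string_to_tokens(formula):
--     full_tokens = ["\\frac", "\\alpha", "\\beta", "\\theta", "\\sigma", "\\pi"]
--     index = 0
--     tokens = []
--
--     while index < len(formula):
--         found = False
--         for full_token in full_tokens:
--             if formula[index:].startswith(full_token):
--                 tokens.append(full_token)
--                 index += len(full_token)
--                 found = True
--                 break
--         if not found:
--             tokens.append(formula[index])
--             index += 1
--
--     return tokens
-- ===== SOURCE B (Python) =====
-- _NAMES = {'f': 'frac', 'a': 'alpha', 'b': 'beta', 't': 'theta', 's': 'sigma', 'p': 'pi'}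
--
--
-- def formula_string_to_tokens(formula):
--     # Split once on the backslash; every multi-char token is a backslash
--     # followed by one of six names, recognizable from its first letter.
--     parts = formula.split('\\')
--     tokens = list(parts[0])
--     for p in parts[1:]:
--         name = _NAMES.get(p[:1])
--         if name is not None and p.startswith(name):
--             tokens.append('\\' + name)
--             tokens.extend(p[len(name):])
--         else:
--             tokens.append('\\')
--             tokens.extend(p)
--     return tokens
-- ===== Notes on version B (the rewrite author's own statement) =====
-- stated objective: faster
-- what changed: Replaces the per-position scan that slices formula[index:] and tries all six LaTeX tokens at every index with a single split on the backslash plus a first-letter dictionary dispatch per backslash-free segment.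
import Mathlib
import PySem

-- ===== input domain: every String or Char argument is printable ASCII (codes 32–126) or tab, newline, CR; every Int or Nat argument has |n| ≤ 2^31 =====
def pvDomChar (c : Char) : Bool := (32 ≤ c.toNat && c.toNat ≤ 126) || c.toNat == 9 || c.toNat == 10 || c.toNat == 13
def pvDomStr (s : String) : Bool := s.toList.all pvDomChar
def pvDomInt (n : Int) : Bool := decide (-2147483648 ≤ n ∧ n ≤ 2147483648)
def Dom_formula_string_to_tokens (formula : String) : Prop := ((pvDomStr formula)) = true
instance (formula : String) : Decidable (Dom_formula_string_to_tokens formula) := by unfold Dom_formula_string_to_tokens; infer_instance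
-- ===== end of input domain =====

-- B replaces A's index scan (try all six tokens at every position) by a single split on '\',
-- handling each backslash-free segment with a first-letter dispatch (measured faster; objective: faster).

-- ===== PORT A =====
def pvFullTokens : List String := ["\\frac", "\\alpha", "\\beta", "\\theta", "\\sigma", "\\pi"]

-- the 'for full_token in full_tokens: if …: …; break' loop is List.find?;
-- formula[index:] (index ≥ 0) is List.drop on the char list; startswith is PySem.Chars.startswith
def pvGoA (formula : List Char) (index : Nat) (tokens : List String) : List String :=
  if h : index < formula.length then
    match h2 : pvFullTokens.find? (fun t => PySem.Chars.startswith (formula.drop index) t.toList) with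
    | some t => pvGoA formula (index + t.toList.length) (tokens ++ [t])
    | none => pvGoA formula (index + 1) (tokens ++ [String.ofList [formula[index]]])
  else tokens
termination_by formula.length - index
decreasing_by
  · have hm := List.mem_of_find?_eq_some h2
    have : 0 < t.toList.length := by
      simp only [pvFullTokens, List.mem_cons, List.not_mem_nil, or_false] at hm
      rcases hm with h | h | h | h | h | h <;> subst h <;> decide
    omega
  · omega

def formula_string_to_tokens (formula : String) : List String := pvGoA formula.toList 0 []

-- ===== PORT B =====
-- _NAMES.get(p[:1]): the six names keyed by their first letter
def pvName1 (c : Char) : Option (List Char) :=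
  if c = 'f' then some ['f','r','a','c']
  else if c = 'a' then some ['a','l','p','h','a']
  else if c = 'b' then some ['b','e','t','a']
  else if c = 't' then some ['t','h','e','t','a']
  else if c = 's' then some ['s','i','g','m','a']
  else if c = 'p' then some ['p','i']
  else none

def pvNameFor (p : List Char) : Option (List Char) :=
  match p with
  | [] => none
  | c :: _ => pvName1 c

-- one iteration of B's 'for p in parts[1:]' body (the tokens contributed for part p)
def pvSegTokens (p : List Char) : List String :=
  match pvNameFor p with
  | some nm =>
    if PySem.Chars.startswith p nm then
      String.ofList ('\\' :: nm) :: (p.drop nm.length).map (fun c => String.ofList [c])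
    else "\\" :: p.map (fun c => String.ofList [c])
  | none => "\\" :: p.map (fun c => String.ofList [c])

def formula_string_to_tokens_alt (formula : String) : List String :=
  match (PySem.Str.split? formula "\\").map (List.map String.toList) with
  | none => []        -- unreachable: the separator "\\" is nonempty
  | some [] => []     -- unreachable: split always yields at least one part
  | some (p0 :: rest) =>
      rest.foldl (fun acc p => acc ++ pvSegTokens p) (p0.map (fun c => String.ofList [c]))

-- ===== PRECONDITION & SPEC =====
def Spec_formula_string_to_tokens (formula : String) (out : List String) : Prop := out = formula_string_to_tokens_alt formula
instance (formula : String) (out : List String) : Decidable (Spec_formula_string_to_tokens formula out) := by unfold Spec_formula_string_to_tokens; infer_instance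

-- ===== CLAIM (what is proved, stated in full; the proofs are below) =====
def Claim_equal_formula_string_to_tokens : Prop := ∀ (formula : String), Dom_formula_string_to_tokens formula → Spec_formula_string_to_tokens formula (formula_string_to_tokens formula)

-- ===== LEMMAS AND PROOFS =====

-- simple recursive model of str.split('\') on the char list
def pvSplit1 : List Char → List (List Char)
  | [] => [[]]
  | c :: cs =>
      if c = '\\' then [] :: pvSplit1 cs
      else
        match pvSplit1 cs with
        | [] => [[c]]
        | h :: t => (c :: h) :: t

lemma pvSplit1_ne_nil (cs : List Char) : pvSplit1 cs ≠ [] := by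
  induction cs with
  | nil => simp [pvSplit1]
  | cons c cs ih =>
    simp only [pvSplit1]
    split_ifs
    · simp
    · rcases h : pvSplit1 cs with _ | ⟨h0, t⟩ <;> simp

lemma pvSplitOn_go_eq (fuel : Nat) : ∀ (l cur acc : _), l.length ≤ fuel →
    PySem.Chars.splitOn.go ['\\'] fuel l cur acc
      = acc.reverse ++ (cur.reverse ++ (pvSplit1 l).headD []) :: (pvSplit1 l).tail := by
  induction fuel with
  | zero =>
    intro l cur acc hl
    have : l = [] := List.length_eq_zero_iff.mp (Nat.le_zero.mp hl)
    subst this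
    simp [PySem.Chars.splitOn.go, pvSplit1]
  | succ fuel ih =>
    intro l cur acc hl
    cases l with
    | nil => simp [PySem.Chars.splitOn.go, pvSplit1]
    | cons c rest =>
      simp only [PySem.Chars.splitOn.go]
      by_cases hc : c = '\\'
      · subst hc
        have hpre : List.isPrefixOf ['\\'] ('\\' :: rest) = true := by
          simp [List.isPrefixOf]
        simp only [hpre, if_pos]
        rw [ih _ _ _ (by simpa using Nat.le_of_succ_le_succ hl)]
        obtain ⟨h0, t, hht⟩ := List.exists_cons_of_ne_nil (pvSplit1_ne_nil rest)
        simp [pvSplit1, hht, List.drop]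
      · have hpre : List.isPrefixOf ['\\'] (c :: rest) = false := by
          simp [List.isPrefixOf]
          intro h; exact absurd h.symm hc
        simp only [hpre, Bool.false_eq_true, if_false]
        rw [ih _ _ _ (by simpa using Nat.le_of_succ_le_succ hl)]
        obtain ⟨h0, t, hht⟩ := List.exists_cons_of_ne_nil (pvSplit1_ne_nil rest)
        simp [pvSplit1, hht, hc]

lemma pvSplitOn_eq (cs : List Char) : PySem.Chars.splitOn cs ['\\'] = pvSplit1 cs := by
  unfold PySem.Chars.splitOn
  rw [pvSplitOn_go_eq _ _ _ _ (by omega)]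
  obtain ⟨h0, t, hht⟩ := List.exists_cons_of_ne_nil (pvSplit1_ne_nil cs)
  simp [hht]

-- B's computation, expressed over the model split
def pvBcore (cs : List Char) : List String :=
  match pvSplit1 cs with
  | [] => []
  | p0 :: rest => p0.map (fun c => String.ofList [c]) ++ rest.flatMap pvSegTokens

lemma pvAlt_eq (formula : String) :
    formula_string_to_tokens_alt formula = pvBcore formula.toList := by
  unfold formula_string_to_tokens_alt
  rw [PySem.Str.split?_map]
  rw [show ("\\" : String).toList = ['\\'] from rfl]
  simp only [PySem.Chars.split?, List.isEmpty_cons, Bool.false_eq_true, if_false, pvSplitOn_eq]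
  unfold pvBcore
  obtain ⟨h0, t, hht⟩ := List.exists_cons_of_ne_nil (pvSplit1_ne_nil formula.toList)
  rw [hht]
  simp [PySem.List.foldl_append_eq_flatMap, List.flatMap]

lemma pvName1_no_bs {c : Char} {nm : List Char} (h : pvName1 c = some nm) :
    '\\' ∉ nm ∧ nm ≠ [] := by
  unfold pvName1 at h
  split_ifs at h <;> simp only [Option.some.injEq] at h <;> subst h <;> decide

-- prefix transfer into the first split part (nm contains no backslash)
lemma pvPrefix_split (nm : List Char) : ∀ (cs h t : _), '\\' ∉ nm →
    pvSplit1 cs = h :: t → (nm.isPrefixOf cs = nm.isPrefixOf h) := by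
  induction nm with
  | nil => intro cs h t _ _; simp [List.isPrefixOf]
  | cons a nm' ih =>
    intro cs h t hbs hs
    have ha : a ≠ '\\' := by intro h'; exact hbs (h' ▸ List.mem_cons_self)
    cases cs with
    | nil =>
      simp only [pvSplit1] at hs
      injection hs with e1 e2; subst e1; subst e2
      simp [List.isPrefixOf]
    | cons c cs' =>
      simp only [pvSplit1] at hs
      by_cases hc : c = '\\'
      · subst hc
        rw [if_pos rfl] at hs
        injection hs with e1 e2; subst e1; subst e2
        simp only [List.isPrefixOf]
        have : (a == '\\') = false := by simpa using ha
        simp [this]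
      · rw [if_neg hc] at hs
        obtain ⟨h1, t1, hht⟩ := List.exists_cons_of_ne_nil (pvSplit1_ne_nil cs')
        rw [hht] at hs
        injection hs with e1 e2; subst e1; subst e2
        simp only [List.isPrefixOf_cons₂]
        by_cases hac : (a == c) = true
        · simp only [hac, Bool.true_and]
          exact ih cs' h1 t1 (fun hm => hbs (List.mem_cons_of_mem _ hm)) hht
        · simp [Bool.eq_false_iff.mpr hac]

-- dropping a backslash-free prefix of the first part keeps the split tail
lemma pvDrop_split (nm : List Char) : ∀ (cs h t : _), '\\' ∉ nm →
    pvSplit1 cs = h :: t → nm.isPrefixOf h = true →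
    pvSplit1 (cs.drop nm.length) = h.drop nm.length :: t := by
  induction nm with
  | nil => intro cs h t _ hs _; simpa using hs
  | cons a nm' ih =>
    intro cs h t hbs hs hp
    cases cs with
    | nil =>
      simp only [pvSplit1] at hs
      injection hs with e1 e2; subst e1; subst e2
      simp [List.isPrefixOf] at hp
    | cons c cs' =>
      simp only [pvSplit1] at hs
      by_cases hc : c = '\\'
      · subst hc
        rw [if_pos rfl] at hs
        injection hs with e1 e2; subst e1; subst e2
        simp [List.isPrefixOf] at hp
      · rw [if_neg hc] at hs
        obtain ⟨h1, t1, hht⟩ := List.exists_cons_of_ne_nil (pvSplit1_ne_nil cs')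
        rw [hht] at hs
        injection hs with e1 e2; subst e1; subst e2
        simp only [List.isPrefixOf_cons₂, Bool.and_eq_true, beq_iff_eq] at hp
        obtain ⟨rfl, hp'⟩ := hp
        simp only [List.length_cons, List.drop_succ_cons]
        exact ih cs' h1 t1 (fun hm => hbs (List.mem_cons_of_mem _ hm)) hht hp'

-- recursion equations for pvBcore
lemma pvBcore_nil : pvBcore [] = [] := by decide

lemma pvBcore_cons_ne {c : Char} (cs : List Char) (hc : c ≠ '\\') :
    pvBcore (c :: cs) = String.ofList [c] :: pvBcore cs := by
  unfold pvBcore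
  obtain ⟨h0, t, hht⟩ := List.exists_cons_of_ne_nil (pvSplit1_ne_nil cs)
  simp [pvSplit1, hc, hht]

lemma pvBcore_cons_bs (cs : List Char) :
    pvBcore ('\\' :: cs) =
      match pvNameFor cs with
      | some nm =>
        if nm.isPrefixOf cs then String.ofList ('\\' :: nm) :: pvBcore (cs.drop nm.length)
        else "\\" :: pvBcore cs
      | none => "\\" :: pvBcore cs := by
  cases cs with
  | nil => decide
  | cons c2 cs2 =>
    simp only [pvNameFor]
    by_cases hc2 : c2 = '\\'
    · subst hc2
      rw [show pvName1 '\\' = none from rfl]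
      simp [pvBcore, pvSplit1, pvSegTokens, pvNameFor]
    · obtain ⟨h1, t1, hht⟩ := List.exists_cons_of_ne_nil (pvSplit1_ne_nil cs2)
      have hsp : pvSplit1 (c2 :: cs2) = (c2 :: h1) :: t1 := by simp [pvSplit1, hc2, hht]
      cases hnm : pvName1 c2 with
      | none =>
        simp [pvBcore, pvSplit1, hc2, hht, pvSegTokens, pvNameFor, hnm]
      | some nm =>
        have hfacts := pvName1_no_bs hnm
        have hpt : nm.isPrefixOf (c2 :: cs2) = nm.isPrefixOf (c2 :: h1) :=
          pvPrefix_split nm _ _ _ hfacts.1 hsp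
        cases hp : nm.isPrefixOf (c2 :: h1) with
        | false =>
          simp [pvBcore, pvSplit1, hc2, hht, pvSegTokens, pvNameFor, hnm, hp, hpt,
            PySem.Chars.startswith]
        | true =>
          have hdrop := pvDrop_split nm (c2 :: cs2) (c2 :: h1) t1 hfacts.1 hsp hp
          simp [pvBcore, pvSplit1, hc2, hht, pvSegTokens, pvNameFor, hnm, hp, hpt, hdrop,
            PySem.Chars.startswith]

-- A's inner loop (find? over the six tokens) characterised via B's first-letter dispatch
lemma pvFind_cons_ne {c : Char} (cs : List Char) (hc : c ≠ '\\') :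
    pvFullTokens.find? (fun t => PySem.Chars.startswith (c :: cs) t.toList) = none := by
  have hb : (('\\' : Char) == c) = false := by simp [Ne.symm hc]
  simp [pvFullTokens, List.find?, PySem.Chars.startswith,
    show ("\\frac" : String).toList = '\\'::'f'::'r'::'a'::'c'::[] from rfl,
    show ("\\alpha" : String).toList = '\\'::'a'::'l'::'p'::'h'::'a'::[] from rfl,
    show ("\\beta" : String).toList = '\\'::'b'::'e'::'t'::'a'::[] from rfl,
    show ("\\theta" : String).toList = '\\'::'t'::'h'::'e'::'t'::'a'::[] from rfl,
    show ("\\sigma" : String).toList = '\\'::'s'::'i'::'g'::'m'::'a'::[] from rfl,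
    show ("\\pi" : String).toList = '\\'::'p'::'i'::[] from rfl,
    List.isPrefixOf_cons₂, hb]

lemma pvFind_bs_nil :
    pvFullTokens.find? (fun t => PySem.Chars.startswith ['\\'] t.toList) = none := by
  decide

lemma pvFind_bs (c2 : Char) (cs2 : List Char) :
    pvFullTokens.find? (fun t => PySem.Chars.startswith ('\\' :: c2 :: cs2) t.toList) =
      match pvName1 c2 with
      | some nm => if nm.isPrefixOf (c2 :: cs2) then some (String.ofList ('\\' :: nm)) else none
      | none => none := by
  simp only [pvFullTokens, List.find?, PySem.Chars.startswith,
    show ("\\frac" : String).toList = '\\'::'f'::'r'::'a'::'c'::[] from rfl,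
    show ("\\alpha" : String).toList = '\\'::'a'::'l'::'p'::'h'::'a'::[] from rfl,
    show ("\\beta" : String).toList = '\\'::'b'::'e'::'t'::'a'::[] from rfl,
    show ("\\theta" : String).toList = '\\'::'t'::'h'::'e'::'t'::'a'::[] from rfl,
    show ("\\sigma" : String).toList = '\\'::'s'::'i'::'g'::'m'::'a'::[] from rfl,
    show ("\\pi" : String).toList = '\\'::'p'::'i'::[] from rfl,
    List.isPrefixOf_cons₂, BEq.rfl, Bool.true_and]
  unfold pvName1
  by_cases hf : c2 = 'f'
  · subst hf; simp [List.isPrefixOf_cons₂]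
    cases hb : List.isPrefixOf ['r','a','c'] cs2 <;> simp [hb, ← List.isPrefixOf_iff_prefix]
  · by_cases ha : c2 = 'a'
    · subst ha; simp [List.isPrefixOf_cons₂, hf]
      cases hb : List.isPrefixOf ['l','p','h','a'] cs2 <;> simp [hb, ← List.isPrefixOf_iff_prefix]
    · by_cases hbb : c2 = 'b'
      · subst hbb; simp [List.isPrefixOf_cons₂, hf, ha]
        cases hb : List.isPrefixOf ['e','t','a'] cs2 <;> simp [hb, ← List.isPrefixOf_iff_prefix]
      · by_cases ht : c2 = 't'
        · subst ht; simp [List.isPrefixOf_cons₂, hf, ha, hbb]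
          cases hb : List.isPrefixOf ['h','e','t','a'] cs2 <;> simp [hb, ← List.isPrefixOf_iff_prefix]
        · by_cases hs : c2 = 's'
          · subst hs; simp [List.isPrefixOf_cons₂, hf, ha, hbb, ht]
            cases hb : List.isPrefixOf ['i','g','m','a'] cs2 <;> simp [hb, ← List.isPrefixOf_iff_prefix]
          · by_cases hp : c2 = 'p'
            · subst hp; simp [List.isPrefixOf_cons₂, hf, ha, hbb, ht, hs]
              cases hb : List.isPrefixOf ['i'] cs2 <;> simp [hb, ← List.isPrefixOf_iff_prefix]
            · have e1 : ('f' == c2) = false := by simp [Ne.symm hf]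
              have e2 : ('a' == c2) = false := by simp [Ne.symm ha]
              have e3 : ('b' == c2) = false := by simp [Ne.symm hbb]
              have e4 : ('t' == c2) = false := by simp [Ne.symm ht]
              have e5 : ('s' == c2) = false := by simp [Ne.symm hs]
              have e6 : ('p' == c2) = false := by simp [Ne.symm hp]
              simp [e1, e2, e3, e4, e5, e6, hf, ha, hbb, ht, hs, hp]

-- main loop invariant: A's scanner from index i produces B's tokens of the remaining suffix
lemma pvMain (cs : List Char) : ∀ (n i : Nat) (tokens : List String), cs.length - i ≤ n →
    pvGoA cs i tokens = tokens ++ pvBcore (cs.drop i) := by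
  intro n
  induction n with
  | zero =>
    intro i tokens hn
    have hi : cs.length ≤ i := by omega
    rw [pvGoA]
    simp [Nat.not_lt.mpr hi, List.drop_eq_nil_of_le hi, pvBcore_nil]
  | succ n ih =>
    intro i tokens hn
    rw [pvGoA]
    by_cases hi : i < cs.length
    · rw [dif_pos hi]
      have hd : cs.drop i = cs[i] :: cs.drop (i + 1) := (List.getElem_cons_drop hi).symm
      by_cases hbs : cs[i] = '\\'
      · rcases hdd : cs.drop (i + 1) with _ | ⟨c2, cs2⟩
        · rw [hbs, hdd] at hd
          split
          · rename_i t h2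
            rw [hd, pvFind_bs_nil] at h2
            cases h2
          · rw [ih (i + 1) _ (by omega), hdd, pvBcore_nil, hd, hbs]
            simp [show pvBcore ['\\'] = ["\\"] from by decide,
              show String.ofList ['\\'] = "\\" from rfl]
        · rw [hbs, hdd] at hd
          split
          · rename_i t h2
            rw [hd, pvFind_bs] at h2
            rcases hnm : pvName1 c2 with _ | nm <;> rw [hnm] at h2
            · cases h2
            · cases hp : List.isPrefixOf nm (c2 :: cs2)
              · simp [hp] at h2
              · simp only [hp, if_pos, Option.some.injEq] at h2
                subst h2
                have hlen : (String.ofList ('\\' :: nm)).toList.length = nm.length + 1 := by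
                  simp
                rw [hlen, ih (i + (nm.length + 1)) _ (by omega)]
                rw [hd, pvBcore_cons_bs]
                simp only [pvNameFor, hnm, hp, if_pos rfl]
                have hd2 : (c2 :: cs2).drop nm.length = cs.drop (i + (nm.length + 1)) := by
                  rw [← hdd, List.drop_drop]
                  congr 1
                  omega
                rw [hd2]
                simp
          · rename_i h2
            rw [hd, pvFind_bs] at h2
            rw [ih (i + 1) _ (by omega), hdd, hd, hbs, pvBcore_cons_bs]
            rcases hnm : pvName1 c2 with _ | nm <;> rw [hnm] at h2
            · simp only [pvNameFor, hnm]
              simp [show String.ofList ['\\'] = "\\" from rfl]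
            · cases hp : List.isPrefixOf nm (c2 :: cs2)
              · simp only [pvNameFor, hnm, hp]
                simp [show String.ofList ['\\'] = "\\" from rfl]
              · simp [hp] at h2
      · split
        · rename_i t h2
          rw [hd, pvFind_cons_ne _ hbs] at h2
          cases h2
        · rw [ih (i + 1) _ (by omega), hd, pvBcore_cons_ne _ hbs]
          simp
    · rw [dif_neg hi]
      simp [List.drop_eq_nil_of_le (Nat.le_of_not_lt hi), pvBcore_nil]

-- ===== VERDICT (by name: the statement is the Claim_ definition above) =====
theorem formula_string_to_tokens_spec : Claim_equal_formula_string_to_tokens := by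
  intro formula _
  unfold Spec_formula_string_to_tokens
  rw [pvAlt_eq]
  unfold formula_string_to_tokens
  simpa using pvMain formula.toList formula.toList.length 0 [] (by omega)
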